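-- pv_equiv track=rewrite | github.com/posl/comment_recommendation | script/mod_gen/4_time/zh/195_C/2.py | solve
-- ===== SOURCE A (Python) =====
-- def solve(n):
--     s = str(n)
--     l = len(s)
--     cnt = 0
--     for i in range(3, l+1, 3):
--         cnt += (l-i+1) * 10**(i//3-1)
--     cnt += (n - 10**(l-1) + 1) * (l//3)
--     return cnt
-- ===== SOURCE B (Python) =====
-- def solve(n):
--     l = len(str(n))
--     m = l // 3
--     geo = (10 ** m - 1) // 9
--     weighted = (m * 10 ** (m + 1) - (m + 1) * 10 ** m + 1) // 81
--     return (l + 1) * geo - 3 * weighted + (n - 10 ** (l - 1) + 1) * m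
-- ===== Notes on version B (the rewrite author's own statement) =====
-- stated objective: faster
-- what changed: Replaced the loop over digit-group lengths with closed-form geometric / arithmetico-geometric sum identities, so the count is computed with no iteration.
import Mathlib
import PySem

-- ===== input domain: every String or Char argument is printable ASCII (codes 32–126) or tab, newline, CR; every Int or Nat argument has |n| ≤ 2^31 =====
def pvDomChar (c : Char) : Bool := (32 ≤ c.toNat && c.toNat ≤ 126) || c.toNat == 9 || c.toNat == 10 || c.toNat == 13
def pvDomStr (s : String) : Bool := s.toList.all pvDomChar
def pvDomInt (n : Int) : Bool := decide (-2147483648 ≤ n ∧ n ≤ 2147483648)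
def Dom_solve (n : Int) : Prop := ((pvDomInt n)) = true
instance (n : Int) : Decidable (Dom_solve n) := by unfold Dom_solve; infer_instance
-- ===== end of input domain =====

-- B replaces A's loop over digit-group lengths by closed-form sum identities (objective: faster, O(1) arithmetic instead of a loop).

-- ===== PORT A =====
def solve (n : Int) : Int :=
  let s := PySem.Int.toStr n
  let l := PySem.Str.len s
  let cnt : Int :=
    (PySem.List.pyRange 3 (l + 1) 3).foldl
      (fun cnt i => cnt + (l - i + 1) * (10 : Int) ^ (PySem.Int.floordiv i 3 - 1).toNat) 0
  cnt + (n - (10 : Int) ^ (l - 1).toNat + 1) * PySem.Int.floordiv l 3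

-- ===== PORT B =====
def solve_alt (n : Int) : Int :=
  let l := PySem.Str.len (PySem.Int.toStr n)
  let m := PySem.Int.floordiv l 3
  let geo := PySem.Int.floordiv ((10 : Int) ^ m.toNat - 1) 9
  let weighted :=
    PySem.Int.floordiv (m * (10 : Int) ^ (m.toNat + 1) - (m + 1) * (10 : Int) ^ m.toNat + 1) 81
  (l + 1) * geo - 3 * weighted + (n - (10 : Int) ^ (l - 1).toNat + 1) * m

-- ===== PRECONDITION & SPEC =====
def Spec_solve (n : Int) (out : Int) : Prop := out = solve_alt n
instance (n : Int) (out : Int) : Decidable (Spec_solve n out) := by unfold Spec_solve; infer_instance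

-- ===== CLAIM (what is proved, stated in full; the proofs are below) =====
def Claim_equal_solve : Prop := ∀ (n : Int), Dom_solve n → Spec_solve n (solve n)

-- ===== LEMMAS AND PROOFS =====

-- closed-form partial sums: gg M = Σ_{k<M} 10^k, ww M = Σ_{k<M} (k+1)·10^k
def gg : Nat → Int
  | 0 => 0
  | M + 1 => gg M + 10 ^ M

def ww : Nat → Int
  | 0 => 0
  | M + 1 => ww M + (M + 1) * 10 ^ M

theorem nine_gg (M : Nat) : 9 * gg M = 10 ^ M - 1 := by
  induction M with
  | zero => simp [gg]
  | succ M ih => simp [gg, pow_succ]; ring_nf; ring_nf at ih; omega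

theorem eightyone_ww (M : Nat) :
    81 * ww M = (M : Int) * 10 ^ (M + 1) - ((M : Int) + 1) * 10 ^ M + 1 := by
  induction M with
  | zero => simp [ww]
  | succ M ih =>
    have : (((M : Nat) + 1 : Nat) : Int) = (M : Int) + 1 := by push_cast; ring
    simp only [ww, this]
    have h10 : ((10:Int)) ^ (M + 1 + 1) = 10 ^ (M + 1) * 10 := by ring
    have h10' : ((10:Int)) ^ (M + 1) = 10 ^ M * 10 := by ring
    rw [mul_add, ih, h10, h10']
    ring

theorem floordiv_gg (M : Nat) : PySem.Int.floordiv ((10 : Int) ^ M - 1) 9 = gg M := by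
  rw [PySem.Int.floordiv_eq_ediv_of_pos (by norm_num), ← nine_gg M]
  exact Int.mul_ediv_cancel_left _ (by norm_num)

theorem floordiv_ww (M : Nat) :
    PySem.Int.floordiv ((M : Int) * 10 ^ (M + 1) - ((M : Int) + 1) * 10 ^ M + 1) 81 = ww M := by
  rw [PySem.Int.floordiv_eq_ediv_of_pos (by norm_num), ← eightyone_ww M]
  exact Int.mul_ediv_cancel_left _ (by norm_num)

-- the loop of A, after reindexing over k < M, equals the closed form
theorem sum_closed (l : Int) (M : Nat) :
    (List.range M).foldl
      (fun c (k : Nat) => c + (l - (3 + 3 * (k : Int)) + 1) *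
        (10 : Int) ^ (PySem.Int.floordiv (3 + 3 * (k : Int)) 3 - 1).toNat) 0
    = (l + 1) * gg M - 3 * ww M := by
  induction M with
  | zero => simp [gg, ww]
  | succ M ih =>
    rw [List.range_succ, List.foldl_append, ih]
    have hc : (3 + 3 * (M : Int)) = ((3 + 3 * M : Nat) : Int) := by push_cast; ring
    have hfd : PySem.Int.floordiv (3 + 3 * (M : Int)) 3 = (M : Int) + 1 := by
      rw [hc]
      have := PySem.Int.floordiv_natCast (3 + 3 * M) 3
      rw [show ((3 : Nat) : Int) = 3 from rfl] at this
      rw [this]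
      have : (3 + 3 * M) / 3 = M + 1 := by omega
      rw [this]; push_cast; ring
    simp only [List.foldl_cons, List.foldl_nil, hfd]
    have ht : ((M : Int) + 1 - 1).toNat = M := by omega
    rw [ht]
    simp only [gg, ww]
    ring

theorem pyRange_step3 (L : Nat) :
    PySem.List.pyRange 3 ((L : Int) + 1) 3
      = (List.range (L / 3)).map (fun (k : Nat) => 3 + 3 * (k : Int)) := by
  rw [PySem.List.pyRange_of_pos 3 ((L : Int) + 1) (by norm_num)]
  have hN : (if (3 : Int) < (L : Int) + 1 then (((L : Int) + 1 - 3 + 3 - 1) / 3).toNat else 0)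
      = L / 3 := by
    split_ifs with h
    · have h3 : ((L : Int) + 1 - 3 + 3 - 1) = (L : Int) := by ring
      rw [h3]; omega
    · omega
  rw [hN]

theorem main_eq (n : Int) : solve n = solve_alt n := by
  unfold solve solve_alt
  simp only [PySem.Str.len_eq]
  generalize (PySem.Int.toStr n).toList.length = L
  have hm : PySem.Int.floordiv (L : Int) 3 = ((L / 3 : Nat) : Int) := by
    have := PySem.Int.floordiv_natCast L 3
    rw [show ((3 : Nat) : Int) = 3 from rfl] at this
    exact this
  rw [hm, pyRange_step3, List.foldl_map, sum_closed]
  have htn : (((L / 3 : Nat) : Int)).toNat = L / 3 := by omega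
  rw [htn, floordiv_gg]
  have hcast : (((L / 3 : Nat) : Int)) * (10 : Int) ^ (L / 3 + 1)
      - ((((L / 3 : Nat) : Int)) + 1) * (10 : Int) ^ (L / 3) + 1
      = ((L / 3 : Nat) : Int) * 10 ^ ((L / 3 : Nat) + 1) - (((L / 3 : Nat) : Int) + 1) * 10 ^ (L / 3 : Nat) + 1 := by
    norm_num
  rw [hcast, floordiv_ww]

-- ===== VERDICT (by name: the statement is the Claim_ definition above) =====
theorem solve_spec : Claim_equal_solve := by
  intro n _
  unfold Spec_solve
  exact main_eq n
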